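-- pv_equiv track=rewrite | github.com/hommat/matura | zbior/78/zad3.py | shortcut
-- ===== SOURCE A (Python) =====
-- def shortcut(message):
--     S = []
--     for char in "ALGORYTM":
--         S.append(ord(char))
--
--     while len(message) % 8 != 0:
--         message += "."
--
--     for i, char in enumerate(message):
--         S[i % 8] = (S[i % 8] + ord(char)) % 128
--
--     w = ""
--     for i in range(0, 8):
--         w += chr(65 + S[i] % 26)
--
--     return w
-- ===== SOURCE B (Python) =====
-- def shortcut(message):
--     message += "." * ((-len(message)) % 8)
--     sums = [ord(c) for c in "ALGORYTM"]
--     for i in range(8):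
--         sums[i] = (sums[i] + sum(ord(ch) for ch in message[i::8])) % 128
--     return "".join(chr(65 + s % 26) for s in sums)
-- ===== Notes on version B (the rewrite author's own statement) =====
-- stated objective: simpler
-- what changed: Replaces A's append-one-dot padding loop and the single round-robin pass that distributes each character into bucket i%8 (one bucket update and one %128 per character) with closed-form padding ((-len)%8) and eight independent strided column sums (message[i::8]) with a single %128 per bucket.
import Mathlib
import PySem

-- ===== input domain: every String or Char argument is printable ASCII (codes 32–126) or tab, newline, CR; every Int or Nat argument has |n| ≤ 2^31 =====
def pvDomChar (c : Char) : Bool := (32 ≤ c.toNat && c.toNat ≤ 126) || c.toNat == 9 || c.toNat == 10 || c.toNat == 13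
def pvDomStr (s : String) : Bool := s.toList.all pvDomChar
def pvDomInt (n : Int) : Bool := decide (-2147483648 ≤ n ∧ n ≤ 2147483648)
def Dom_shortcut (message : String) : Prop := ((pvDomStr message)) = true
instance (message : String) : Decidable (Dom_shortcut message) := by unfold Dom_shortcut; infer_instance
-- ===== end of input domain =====

-- B replaces A's round-robin per-character bucket updates with closed-form padding and
-- eight independent strided column sums (objective: simpler; equal return values proved below).

-- ===== PORT A =====
-- A's `while len(message) % 8 != 0: message += "."` loop, literally
def padLoop (cs : List Char) : List Char :=
  if cs.length % 8 = 0 then cs else padLoop (cs ++ ['.'])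
termination_by (8 - cs.length % 8) % 8
decreasing_by simp only [List.length_append, List.length_cons, List.length_nil]; omega

-- one step of A's `for i, char in enumerate(message)` loop: S[i % 8] = (S[i % 8] + ord(char)) % 128
def aStep (S : List Int) (ic : Int × Char) : List Int :=
  PySem.List.pySetD S (PySem.Int.mod ic.1 8)
    (PySem.Int.mod (PySem.List.pyGetD S (PySem.Int.mod ic.1 8) 0 + (ic.2.toNat : Int)) 128)

def shortcut (message : String) : String :=
  -- S = []; for char in "ALGORYTM": S.append(ord(char))
  let S : List Int := "ALGORYTM".toList.foldl (fun acc c => acc ++ [(c.toNat : Int)]) []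
  let padded := padLoop message.toList
  let S := (PySem.List.enumerate padded).foldl aStep S
  -- w = ""; for i in range(0, 8): w += chr(65 + S[i] % 26)
  let w := (PySem.List.pyRange 0 8 1).foldl
    (fun w i => w ++ [Char.ofNat (65 + PySem.Int.mod (PySem.List.pyGetD S i 0) 26).toNat]) ([] : List Char)
  String.mk w

-- ===== PORT B =====
-- B's strided slice message[i::8] (exact for a nonnegative start, handled by the preceding `.drop`)
def stride8 (cs : List Char) : List Char :=
  match cs with
  | [] => []
  | c :: rest => c :: stride8 (rest.drop 7)
termination_by cs.length
decreasing_by simp only [List.length_cons, List.length_drop]; omega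

-- sum(ord(ch) for ch in cs)
def osum (cs : List Char) : Int := cs.foldl (fun a c => a + (c.toNat : Int)) 0

def shortcut_alt (message : String) : String :=
  let cs := message.toList
  -- message += "." * ((-len(message)) % 8)
  let padded := cs ++ List.replicate (PySem.Int.mod (-(cs.length : Int)) 8).toNat '.'
  -- sums = [(ord(init) + sum(ord(ch) for ch in message[i::8])) % 128 for i, init in enumerate("ALGORYTM")]
  let sums := ("ALGORYTM".toList.zipIdx).map
    (fun p => PySem.Int.mod ((p.1.toNat : Int) + osum (stride8 (padded.drop p.2))) 128)
  -- "".join(chr(65 + s % 26) for s in sums)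
  String.mk (sums.map (fun s => Char.ofNat (65 + PySem.Int.mod s 26).toNat))

-- ===== PRECONDITION & SPEC =====
def Spec_shortcut (message : String) (out : String) : Prop := out = shortcut_alt message
instance (message : String) (out : String) : Decidable (Spec_shortcut message out) := by unfold Spec_shortcut; infer_instance

-- ===== CLAIM (what is proved, stated in full; the proofs are below) =====
def Claim_equal_shortcut : Prop := ∀ (message : String), Dom_shortcut message → Spec_shortcut message (shortcut message)

-- ===== LEMMAS AND PROOFS =====

-- ord-sum of the chars at positions p with (p - r) ≡ 0 (mod 8)
def colsumR (r : Int) : List Char → Int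
  | [] => 0
  | c :: cs => (if r % 8 = 0 then (c.toNat : Int) else 0) + colsumR (r - 1) cs

theorem colsumR_congr (cs : List Char) : ∀ r r' : Int, r % 8 = r' % 8 → colsumR r cs = colsumR r' cs := by
  induction cs with
  | nil => intro r r' _; rfl
  | cons c cs ih =>
    intro r r' h
    simp only [colsumR, h, ih (r - 1) (r' - 1) (by omega)]

theorem stride8_nil : stride8 [] = [] := by simp only [stride8]

theorem stride8_cons (c : Char) (rest : List Char) :
    stride8 (c :: rest) = c :: stride8 (rest.drop 7) := by simp only [stride8]

theorem osum_shift (cs : List Char) : ∀ a : Int, cs.foldl (fun a c => a + (c.toNat : Int)) a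
    = a + osum cs := by
  induction cs with
  | nil => intro a; simp only [List.foldl_nil, osum]; omega
  | cons c cs ih =>
    intro a
    rw [List.foldl_cons, ih]
    have h2 : osum (c :: cs) = (0 + (c.toNat : Int)) + osum cs := by
      rw [osum, List.foldl_cons, ih]
    omega

theorem osum_cons (c : Char) (cs : List Char) : osum (c :: cs) = (c.toNat : Int) + osum cs := by
  rw [osum, List.foldl_cons, osum_shift]; omega

theorem colsumR_eq_stride (cs : List Char) : ∀ k : Nat, k < 8 →
    colsumR (k : Int) cs = osum (stride8 (cs.drop k)) := by
  induction cs with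
  | nil => intro k _; simp [colsumR, stride8_nil, osum]
  | cons c cs ih =>
    intro k hk
    cases k with
    | zero =>
      rw [List.drop_zero, stride8_cons, osum_cons, Nat.cast_zero]
      simp only [colsumR]
      have ih7 := ih 7 (by omega)
      norm_num at ih7
      rw [if_pos (by decide), colsumR_congr cs ((0:Int) - 1) 7 (by decide), ih7]
    | succ j =>
      have hne : ((j + 1 : Nat) : Int) % 8 ≠ 0 := by omega
      have : ((j + 1 : Nat) : Int) - 1 = (j : Nat) := by push_cast; ring
      simp only [colsumR, if_neg hne, this, List.drop_succ_cons]
      rw [ih j (by omega)]; omega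

-- getD/set helpers
theorem getD_set_self (S : List Int) (i : Nat) (x : Int) (h : i < S.length) :
    (S.set i x).getD i 0 = x := by
  simp [List.getD, List.getElem?_set_self, h]

theorem getD_set_ne (S : List Int) (i j : Nat) (x : Int) (h : j ≠ i) :
    (S.set i x).getD j 0 = S.getD j 0 := by
  simp [List.getD, List.getElem?_set_ne (by omega : i ≠ j)]

-- main invariant of A's enumerate loop
theorem mainLoop (cs : List Char) : ∀ (n : Nat) (S : List Int), S.length = 8 →
    (∀ j : Nat, j < 8 → 0 ≤ S.getD j 0 ∧ S.getD j 0 < 128) →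
    ∀ k : Nat, k < 8 →
      ((PySem.List.enumerate cs (n : Int)).foldl aStep S).getD k 0
        = (S.getD k 0 + colsumR ((k : Int) - n) cs) % 128 := by
  induction cs with
  | nil =>
    intro n S hlen hB k hk
    simp only [PySem.List.enumerate, List.foldl_nil, colsumR]
    have := hB k hk
    omega
  | cons c cs ih =>
    intro n S hlen hB k hk
    have hmod : PySem.Int.mod (n : Int) 8 = ((n % 8 : Nat) : Int) := PySem.Int.mod_natCast n 8
    have hstep : aStep S ((n : Int), c)
        = S.set (n % 8) ((S.getD (n % 8) 0 + (c.toNat : Int)) % 128) := by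
      simp only [aStep, hmod, PySem.List.pySetD_natCast, PySem.List.pyGetD_natCast]
      rw [PySem.Int.mod_eq_emod_of_pos (by norm_num)]
    have henum : PySem.List.enumerate (c :: cs) (n : Int)
        = ((n : Int), c) :: PySem.List.enumerate cs ((n + 1 : Nat) : Int) := by
      simp [PySem.List.enumerate]
    set S' := S.set (n % 8) ((S.getD (n % 8) 0 + (c.toNat : Int)) % 128) with hS'
    have hlen' : S'.length = 8 := by simp [hS', hlen]
    have hnm : n % 8 < 8 := by omega
    have hB' : ∀ j : Nat, j < 8 → 0 ≤ S'.getD j 0 ∧ S'.getD j 0 < 128 := by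
      intro j hj
      by_cases hje : j = n % 8
      · subst hje
        rw [hS', getD_set_self S _ _ (by omega)]
        constructor
        · exact Int.emod_nonneg _ (by norm_num)
        · exact Int.emod_lt_of_pos _ (by norm_num)
      · rw [hS', getD_set_ne S _ _ _ hje]; exact hB j hj
    have IH := ih (n + 1) S' hlen' hB' k hk
    rw [henum, List.foldl_cons, hstep, IH]
    have hcol : colsumR ((k : Int) - n) (c :: cs)
        = (if ((k : Int) - n) % 8 = 0 then (c.toNat : Int) else 0)
          + colsumR ((k : Int) - ((n + 1 : Nat) : Int)) cs := by
      simp only [colsumR]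
      congr 1
      push_cast; ring_nf
    by_cases hke : k = n % 8
    · have hgs : S'.getD k 0 = (S.getD (n % 8) 0 + (c.toNat : Int)) % 128 := by
        rw [hS', hke]; exact getD_set_self S _ _ (by omega)
      rw [hcol, if_pos (show ((k : Int) - n) % 8 = 0 by omega), hgs, hke]
      omega
    · have hgs : S'.getD k 0 = S.getD k 0 := by
        rw [hS']; exact getD_set_ne S _ _ _ hke
      rw [hcol, if_neg (show ¬ ((k : Int) - n) % 8 = 0 by omega), hgs]
      omega

-- the two paddings coincide
theorem pad_eq (cs : List Char) :
    padLoop cs = cs ++ List.replicate (PySem.Int.mod (-(cs.length : Int)) 8).toNat '.' := by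
  have hmod : ∀ l : Nat, (PySem.Int.mod (-(l : Int)) 8).toNat = (8 - l % 8) % 8 := by
    intro l
    rw [PySem.Int.mod_eq_emod_of_pos (by norm_num)]
    omega
  rw [hmod]
  fun_induction padLoop cs with
  | case1 cs h =>
    have h0 : (8 - cs.length % 8) % 8 = 0 := by omega
    rw [h0]
    simp
  | case2 cs h ih =>
    rw [ih]
    have hlen : (cs ++ ['.']).length = cs.length + 1 := by simp
    rw [hlen]
    have hc : (8 - cs.length % 8) % 8 = (8 - (cs.length + 1) % 8) % 8 + 1 := by omega
    rw [hc, List.replicate_succ, List.append_assoc]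
    rfl

-- ===== VERDICT (by name: the statement is the Claim_ definition above) =====
theorem shortcut_spec : Claim_equal_shortcut := by
  intro message _
  unfold Spec_shortcut shortcut shortcut_alt
  rw [pad_eq]
  set padded := message.toList ++ List.replicate (PySem.Int.mod (-(message.toList.length : Int)) 8).toNat '.' with hp
  have hS0 : ("ALGORYTM".toList.foldl (fun acc c => acc ++ [(c.toNat : Int)]) [])
      = [65, 76, 71, 79, 82, 89, 84, 77] := by decide
  have hB0 : ∀ j : Nat, j < 8 →
      0 ≤ ([65, 76, 71, 79, 82, 89, 84, 77] : List Int).getD j 0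
        ∧ ([65, 76, 71, 79, 82, 89, 84, 77] : List Int).getD j 0 < 128 := by
    intro j hj; interval_cases j <;> simp [List.getD]
  have hM := mainLoop padded 0 [65, 76, 71, 79, 82, 89, 84, 77] (by decide) hB0
  simp only [Nat.cast_zero, sub_zero] at hM
  have hR : PySem.List.pyRange 0 8 1 = ([0, 1, 2, 3, 4, 5, 6, 7] : List Int) := by decide
  have hA : "ALGORYTM".toList = ['A', 'L', 'G', 'O', 'R', 'Y', 'T', 'M'] := by decide
  rw [hS0, hR, hA]
  set Sf := (PySem.List.enumerate padded (0 : Int)).foldl aStep [65, 76, 71, 79, 82, 89, 84, 77] with hSf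
  have hk : ∀ k : Nat, k < 8 → ∀ init : Int,
      ([65, 76, 71, 79, 82, 89, 84, 77] : List Int).getD k 0 = init →
      PySem.List.pyGetD Sf (k : Int) 0
        = PySem.Int.mod (init + osum (stride8 (padded.drop k))) 128 := by
    intro k hkl init hinit
    have h := hM k hkl
    rw [hinit] at h
    rw [PySem.List.pyGetD_natCast, h, colsumR_eq_stride padded k hkl,
      PySem.Int.mod_eq_emod_of_pos (by norm_num)]
  simp only [List.zipIdx, List.map, List.foldl]
  have h0 := hk 0 (by omega) 65 rfl
  have h1 := hk 1 (by omega) 76 rfl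
  have h2 := hk 2 (by omega) 71 rfl
  have h3 := hk 3 (by omega) 79 rfl
  have h4 := hk 4 (by omega) 82 rfl
  have h5 := hk 5 (by omega) 89 rfl
  have h6 := hk 6 (by omega) 84 rfl
  have h7 := hk 7 (by omega) 77 rfl
  norm_num at h0 h1 h2 h3 h4 h5 h6 h7 ⊢
  rw [h0, h1, h2, h3, h4, h5, h6, h7]
  simp [hp]
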